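-- pv_equiv track=rewrite | github.com/Jeremyy55/AO_TP1 | hypervolume/main.py | compute_ref
-- ===== SOURCE A (Python) =====
-- def compute_ref(sols):
--     reference = sols[-1]
--     for sol in sols[:-1]:
--         for i in range(len(reference)):
--             if sol[i] > reference[i]:
--                 reference[i] = sol[i]
--     for i in range(len(reference)):
--         reference[i] = int(1.10*reference[i])
--     return reference
-- ===== SOURCE B (Python) =====
-- def compute_ref(sols):
--     # Transpose-based: zip(*sols) yields the columns; take max of each column
--     # and scale; splice the result into sols[-1] so that, like A, the last
--     # solution is mutated in place and that same object is returned.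
--     ref = sols[-1]
--     ref[:] = [int(1.10 * max(col)) for col in zip(*sols)]
--     return ref
-- ===== Notes on version B (the rewrite author's own statement) =====
-- stated objective: alternative
-- what changed: A's two staged in-place passes (solution-outer running max into sols[-1], then a scaling pass) are replaced by a transpose: zip(*sols) yields the columns, each column's max is scaled in one comprehension, and the result is spliced into sols[-1].
import Mathlib
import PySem

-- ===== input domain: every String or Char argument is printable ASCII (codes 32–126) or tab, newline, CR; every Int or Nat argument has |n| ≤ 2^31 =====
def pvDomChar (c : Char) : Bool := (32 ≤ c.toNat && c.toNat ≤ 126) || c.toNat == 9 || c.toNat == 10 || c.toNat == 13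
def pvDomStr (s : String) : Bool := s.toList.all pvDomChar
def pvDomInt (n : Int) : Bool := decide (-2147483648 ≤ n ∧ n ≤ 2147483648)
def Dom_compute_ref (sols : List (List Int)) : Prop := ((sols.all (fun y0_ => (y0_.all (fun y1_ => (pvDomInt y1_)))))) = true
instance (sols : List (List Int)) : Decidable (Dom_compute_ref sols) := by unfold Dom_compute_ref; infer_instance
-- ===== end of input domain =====

-- B replaces A's two staged in-place passes with a transpose (zip(*sols)) plus one
-- max-and-scale comprehension spliced into sols[-1]; return-value equivalence only:
-- both Pythons mutate sols[-1] in place identically and return that same object.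
-- int(1.10*x) is ported as truncating (11*x)/10, exact for |x| ≤ 2^31 (the Dom bound).

-- ===== PORT A =====
-- int(1.10*x): truncation toward zero; exact on Dom's |x| ≤ 2^31
def pyScale110 (x : Int) : Int := Int.tdiv (11 * x) 10

def compute_ref (sols : List (List Int)) : List Int :=
  let reference := PySem.List.pyGetD sols (-1) []
  let reference :=
    (PySem.List.slice sols none (some (-1))).foldl
      (fun r sol =>
        (PySem.List.pyRange 0 (r.length : Int) 1).foldl
          (fun r i =>
            if PySem.List.pyGetD sol i 0 > PySem.List.pyGetD r i 0 then
              PySem.List.pySetD r i (PySem.List.pyGetD sol i 0)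
            else r) r) reference
  (PySem.List.pyRange 0 (reference.length : Int) 1).foldl
    (fun r i => PySem.List.pySetD r i (pyScale110 (PySem.List.pyGetD r i 0))) reference

-- ===== PORT B =====
-- hand port of Python zip(*rest ...): columns while every list is nonempty (zip truncates
-- at the shortest argument); exact transcription of zip's semantics on lists of ints
def zipCols : List Int → List (List Int) → List (List Int)
  | [], _ => []
  | x :: xs, rest =>
      if rest.all (fun s => !s.isEmpty) then
        (x :: rest.map (fun s => s.headD 0)) :: zipCols xs (rest.map List.tail)
      else []

-- zip(*sols): zero arguments give the empty iterator
def zipStar (sols : List (List Int)) : List (List Int) :=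
  match sols with
  | [] => []
  | f :: r => zipCols f r

def compute_ref_alt (sols : List (List Int)) : List Int :=
  -- ref = sols[-1]; ref[:] = [int(1.10*max(col)) for col in zip(*sols)]; return ref
  (zipStar sols).map (fun col => pyScale110 ((PySem.List.max? col (fun y => y)).getD 0))

-- ===== PRECONDITION & SPEC =====
-- Pre_ excludes exactly the inputs where the Pythons raise IndexError: empty sols
-- (sols[-1]) and rows shorter than the last row (sol[i]).
def Pre_compute_ref (sols : List (List Int)) : Prop :=
  sols ≠ [] ∧ ∀ s ∈ sols, (sols.getLast?.getD []).length ≤ s.length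
instance (sols : List (List Int)) : Decidable (Pre_compute_ref sols) := by
  unfold Pre_compute_ref; infer_instance

def pvWitness_compute_ref : List (List Int) := [[1, 5], [4, -2], [3, 0]]

def Spec_compute_ref (sols : List (List Int)) (out : List Int) : Prop := out = compute_ref_alt sols
instance (sols : List (List Int)) (out : List Int) : Decidable (Spec_compute_ref sols out) := by unfold Spec_compute_ref; infer_instance

-- ===== CLAIM (what is proved, stated in full; the proofs are below) =====
def Claim_equal_compute_ref : Prop := ∀ (sols : List (List Int)), Dom_compute_ref sols → Pre_compute_ref sols → Spec_compute_ref sols (compute_ref sols)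

-- ===== LEMMAS AND PROOFS =====

-- generic index-wise fold over range(n): each step rewrites index i from its own old value
theorem fold_set_range (step : List Int → Int → List Int) (h : Nat → Int → Int)
    (hstep : ∀ (r : List Int) (i : Nat), i < r.length →
      (step r (i : Int)).length = r.length ∧
      ∀ k : Nat, (step r (i : Int)).getD k 0 = if k = i then h i (r.getD k 0) else r.getD k 0) :
    ∀ (n : Nat) (r : List Int), n ≤ r.length →
      ((PySem.List.pyRange 0 (n : Int) 1).foldl step r).length = r.length ∧
      ∀ k : Nat, ((PySem.List.pyRange 0 (n : Int) 1).foldl step r).getD k 0 =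
        if k < n then h k (r.getD k 0) else r.getD k 0 := by
  intro n
  induction n with
  | zero =>
      intro r _
      simp
  | succ n ih =>
      intro r hn
      have hr : ((n : Int) + 1) = ((n + 1 : Nat) : Int) := by push_cast; ring
      have hsplit : PySem.List.pyRange 0 ((n + 1 : Nat) : Int) 1 =
          PySem.List.pyRange 0 (n : Int) 1 ++ [(n : Int)] := by
        rw [← hr, PySem.List.pyRange_one_succ_right (by positivity)]
      have hle : n ≤ r.length := by omega
      obtain ⟨hlen, hget⟩ := ih r hle
      have hnlt : n < ((PySem.List.pyRange 0 (n : Int) 1).foldl step r).length := by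
        rw [hlen]; omega
      obtain ⟨hlen2, hget2⟩ := hstep _ n hnlt
      rw [hsplit, List.foldl_append]
      simp only [List.foldl_cons, List.foldl_nil]
      constructor
      · rw [hlen2, hlen]
      · intro k
        rw [hget2 k]
        by_cases hk : k = n
        · subst hk
          rw [if_pos rfl, hget k, if_neg (by omega : ¬ k < k), if_pos (by omega : k < k + 1)]
        · rw [if_neg hk, hget k]
          by_cases h1 : k < n
          · rw [if_pos h1, if_pos (by omega)]
          · rw [if_neg h1, if_neg (by omega)]

-- getD/length facts about a single write r[i] = v
theorem setConst_spec (r : List Int) (i : Nat) (v : Int) (hi : i < r.length) :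
    (PySem.List.pySetD r (i : Int) v).length = r.length ∧
    ∀ k : Nat, (PySem.List.pySetD r (i : Int) v).getD k 0 = if k = i then v else r.getD k 0 := by
  simp only [PySem.List.pySetD_natCast]
  refine ⟨by simp, ?_⟩
  intro k
  by_cases hk : k = i
  · subst hk; simp [List.getD, hi]
  · rw [if_neg hk]
    simp only [List.getD, List.getElem?_set]
    rw [if_neg (fun h => hk h.symm)]

-- getD/length facts about one conditional-max step (A's inner body)
theorem stepA_spec (sol : List Int) (r : List Int) (i : Nat) (hi : i < r.length) :
    ((if PySem.List.pyGetD sol (i : Int) 0 > PySem.List.pyGetD r (i : Int) 0 then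
        PySem.List.pySetD r (i : Int) (PySem.List.pyGetD sol (i : Int) 0)
      else r).length = r.length) ∧
    ∀ k : Nat, (if PySem.List.pyGetD sol (i : Int) 0 > PySem.List.pyGetD r (i : Int) 0 then
        PySem.List.pySetD r (i : Int) (PySem.List.pyGetD sol (i : Int) 0)
      else r).getD k 0 = if k = i then max (r.getD k 0) (sol.getD i 0) else r.getD k 0 := by
  simp only [PySem.List.pyGetD_natCast, PySem.List.pySetD_natCast]
  refine ⟨by split <;> simp, ?_⟩
  intro k
  by_cases hc : sol.getD i 0 > r.getD i 0
  · rw [if_pos hc]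
    by_cases hk : k = i
    · subst hk
      rw [if_pos rfl]
      simp only [List.getD] at hc ⊢
      simp [hi]
      rw [List.getElem?_eq_getElem hi] at hc
      simp at hc
      omega
    · rw [if_neg hk]
      simp only [List.getD, List.getElem?_set]
      rw [if_neg (fun h => hk h.symm)]
  · rw [if_neg hc]
    by_cases hk : k = i
    · subst hk; rw [if_pos rfl]; omega
    · rw [if_neg hk]

-- A's inner loop over range(len(r)): pointwise max with sol
theorem innerA_spec (sol : List Int) (r : List Int) :
    (((PySem.List.pyRange 0 (r.length : Int) 1).foldl
      (fun r i =>
        if PySem.List.pyGetD sol i 0 > PySem.List.pyGetD r i 0 then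
          PySem.List.pySetD r i (PySem.List.pyGetD sol i 0)
        else r) r).length = r.length) ∧
    ∀ k : Nat, ((PySem.List.pyRange 0 (r.length : Int) 1).foldl
      (fun r i =>
        if PySem.List.pyGetD sol i 0 > PySem.List.pyGetD r i 0 then
          PySem.List.pySetD r i (PySem.List.pyGetD sol i 0)
        else r) r).getD k 0 =
      if k < r.length then max (r.getD k 0) (sol.getD k 0) else r.getD k 0 := by
  exact fold_set_range _ (fun i v => max v (sol.getD i 0))
    (fun r i hi => stepA_spec sol r i hi) r.length r le_rfl

-- A's outer loop: fold of pointwise maxes over a list of solutions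
theorem outerA_spec (L : List (List Int)) :
    ∀ (acc : List Int),
      ((L.foldl (fun r sol =>
        (PySem.List.pyRange 0 (r.length : Int) 1).foldl
          (fun r i =>
            if PySem.List.pyGetD sol i 0 > PySem.List.pyGetD r i 0 then
              PySem.List.pySetD r i (PySem.List.pyGetD sol i 0)
            else r) r) acc).length = acc.length) ∧
      ∀ k : Nat, k < acc.length →
        (L.foldl (fun r sol =>
          (PySem.List.pyRange 0 (r.length : Int) 1).foldl
            (fun r i =>
              if PySem.List.pyGetD sol i 0 > PySem.List.pyGetD r i 0 then
                PySem.List.pySetD r i (PySem.List.pyGetD sol i 0)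
              else r) r) acc).getD k 0 =
        L.foldl (fun a s => max a (s.getD k 0)) (acc.getD k 0) := by
  induction L with
  | nil => intro acc; simp
  | cons sol L ih =>
      intro acc
      obtain ⟨hlen1, hget1⟩ := innerA_spec sol acc
      obtain ⟨hlen2, hget2⟩ := ih _
      simp only [List.foldl_cons]
      refine ⟨by rw [hlen2, hlen1], ?_⟩
      intro k hk
      rw [hget2 k (by omega), hget1 k]
      rw [if_pos hk]

-- running max commutes out of the seed
theorem foldl_max_comm (t : List Int) : ∀ a b : Int,
    t.foldl max (max a b) = max (t.foldl max a) b := by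
  induction t with
  | nil => intro a b; simp
  | cons x t ih =>
      intro a b
      simp only [List.foldl_cons]
      rw [max_right_comm, ih]

-- Python max over all rows at coordinate k = A's running max seeded with the last row
theorem max_all_eq (dl : List (List Int)) (last : List Int) (k : Nat) :
    ((PySem.List.max? ((dl ++ [last]).map (fun s => s.getD k 0)) (fun y => y)).getD 0) =
    dl.foldl (fun a s => max a (s.getD k 0)) (last.getD k 0) := by
  have hfold : ∀ (L : List (List Int)) (a : Int),
      L.foldl (fun a s => max a (s.getD k 0)) a = (L.map (fun s => s.getD k 0)).foldl max a := by
    intro L; induction L with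
    | nil => intro a; rfl
    | cons x t ih => intro a; simp only [List.map_cons, List.foldl_cons]; exact ih _
  rw [hfold]
  cases hdl : dl.map (fun s => s.getD k 0) with
  | nil => simp at hdl ⊢; simp [hdl, PySem.List.max?_id_cons]
  | cons x t =>
      have : (dl ++ [last]).map (fun s => s.getD k 0) = x :: (t ++ [last.getD k 0]) := by
        rw [List.map_append, hdl]; rfl
      rw [this, PySem.List.max?_id_cons]
      simp only [Option.getD_some, List.foldl_append, List.foldl_cons, List.foldl_nil]
      rw [max_comm (last.getD k 0) x, foldl_max_comm]

-- zipCols (the hand port of zip) : when every list has at least m elements and one of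
-- them has exactly m, it produces the m columns
theorem zipCols_spec : ∀ (m : Nat) (f : List Int) (rest : List (List Int)),
    m ≤ f.length → (∀ s ∈ rest, m ≤ s.length) →
    (f.length = m ∨ ∃ s ∈ rest, s.length = m) →
    (zipCols f rest).length = m ∧
    ∀ k : Nat, k < m → (zipCols f rest).getD k [] = (f :: rest).map (fun s => s.getD k 0) := by
  intro m
  induction m with
  | zero =>
      intro f rest _ _ hex
      have hz : zipCols f rest = [] := by
        cases f with
        | nil => rfl
        | cons x xs =>
            rcases hex with h | ⟨s, hs, hlen⟩
            · simp at h
            · have hsnil : s = [] := List.length_eq_zero_iff.mp hlen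
              unfold zipCols
              rw [if_neg]
              intro hall
              have := List.all_eq_true.mp hall s hs
              simp [hsnil] at this
      simp [hz]
  | succ m ih =>
      intro f rest hf hr hex
      cases f with
      | nil => simp at hf
      | cons x xs =>
          have hall : rest.all (fun s => !s.isEmpty) = true := by
            apply List.all_eq_true.mpr
            intro s hs
            have := hr s hs
            cases s with
            | nil => simp at this
            | cons a t => simp
          have hstep : zipCols (x :: xs) rest =
              (x :: rest.map (fun s => s.headD 0)) :: zipCols xs (rest.map List.tail) := by
            rw [zipCols, if_pos hall]
          have hxs : m ≤ xs.length := by simp at hf; omega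
          have hrt : ∀ t ∈ rest.map List.tail, m ≤ t.length := by
            intro t ht
            obtain ⟨s, hs, rfl⟩ := List.mem_map.mp ht
            have := hr s hs
            simp [List.length_tail]
            omega
          have hex' : xs.length = m ∨ ∃ t ∈ rest.map List.tail, t.length = m := by
            rcases hex with h | ⟨s, hs, hlen⟩
            · left; simp at h; omega
            · right
              exact ⟨s.tail, List.mem_map.mpr ⟨s, hs, rfl⟩, by simp [List.length_tail]; omega⟩
          obtain ⟨hlen, hget⟩ := ih xs (rest.map List.tail) hxs hrt hex'
          rw [hstep]
          constructor
          · simp [hlen]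
          · intro k hk
            cases k with
            | zero =>
                simp only [List.getD, List.getElem?_cons_zero, Option.getD_some, List.map_cons]
                congr 1
                apply List.map_congr_left
                intro s _
                cases s <;> simp
            | succ k =>
                have hk' : k < m := by omega
                simp only [List.getD_cons_succ]
                rw [hget k hk']
                simp only [List.map_cons, List.map_map]
                congr 1
                apply List.map_congr_left
                intro s _
                cases s <;> simp

theorem compute_ref_spec : Claim_equal_compute_ref := by
  intro sols _ hpre
  obtain ⟨hne, hall⟩ := hpre
  unfold Spec_compute_ref compute_ref compute_ref_alt
  simp only []
  have href : PySem.List.pyGetD sols (-1) ([] : List Int) = sols.getLast hne :=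
    PySem.List.pyGetD_neg_one sols [] hne
  set ref := PySem.List.pyGetD sols (-1) ([] : List Int) with hrefdef
  have hlastD : sols.getLast?.getD [] = ref := by
    rw [href, List.getLast?_eq_some_getLast hne]; rfl
  have hall' : ∀ s ∈ sols, ref.length ≤ s.length := by
    intro s hs; have := hall s hs; rwa [hlastD] at this
  have hsols : sols.dropLast ++ [ref] = sols := by
    rw [href]; exact List.dropLast_append_getLast hne
  -- A, phase 1
  have hslice : PySem.List.slice sols none (some (-1)) = sols.dropLast :=
    PySem.List.slice_to_neg_one sols
  rw [hslice]
  obtain ⟨hPlen, hPget⟩ := outerA_spec sols.dropLast ref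
  set P := sols.dropLast.foldl
      (fun r sol =>
        (PySem.List.pyRange 0 (r.length : Int) 1).foldl
          (fun r i =>
            if PySem.List.pyGetD sol i 0 > PySem.List.pyGetD r i 0 then
              PySem.List.pySetD r i (PySem.List.pyGetD sol i 0)
            else r) r) ref with hPdef
  -- A, phase 2
  obtain ⟨hAlen, hAget⟩ := fold_set_range
    (fun r i => PySem.List.pySetD r i (pyScale110 (PySem.List.pyGetD r i 0)))
    (fun _ v => pyScale110 v)
    (fun r i hi => by
      obtain ⟨h1, h2⟩ := setConst_spec r i (pyScale110 (PySem.List.pyGetD r (i : Int) 0)) hi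
      refine ⟨h1, fun k => ?_⟩
      rw [h2 k]
      by_cases hk : k = i
      · subst hk
        rw [if_pos rfl, if_pos rfl, PySem.List.pyGetD_natCast]
      · rw [if_neg hk, if_neg hk])
    P.length P le_rfl
  -- B: the transpose
  obtain ⟨f, r, rfl⟩ : ∃ f r, sols = f :: r := by
    cases sols with
    | nil => exact absurd rfl hne
    | cons f r => exact ⟨f, r, rfl⟩
  have hZ := zipCols_spec ref.length f r
    (hall' f (List.mem_cons_self))
    (fun s hs => hall' s (List.mem_cons_of_mem f hs))
    (by
      have hmem : (f :: r).getLast hne ∈ f :: r := List.getLast_mem hne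
      have hlen : ((f :: r).getLast hne).length = ref.length := by rw [href]
      rcases List.mem_cons.mp hmem with h | h
      · left; rw [← h]; exact hlen
      · right; exact ⟨_, h, hlen⟩)
  obtain ⟨hZlen, hZget⟩ := hZ
  -- conclude pointwise
  apply List.ext_getElem
  · rw [hAlen, hPlen]
    simp only [zipStar, List.length_map, hZlen]
  · intro k hkA hkB
    have hkn : k < ref.length := by
      simpa [zipStar, hZlen] using hkB
    have hkP : k < P.length := by rw [hPlen]; exact hkn
    have hA : (List.foldl
        (fun r i => PySem.List.pySetD r i (pyScale110 (PySem.List.pyGetD r i 0)))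
        P (PySem.List.pyRange 0 (P.length : Int) 1)).getD k 0 =
        pyScale110 (P.getD k 0) := by
      rw [hAget k, if_pos hkP]
    have hcol : (zipCols f r).getD k [] = (f :: r).map (fun s => s.getD k 0) :=
      hZget k hkn
    have hB : ((zipStar (f :: r)).map
        (fun col => pyScale110 ((PySem.List.max? col (fun y => y)).getD 0)))[k]'hkB =
        pyScale110 ((PySem.List.max? ((f :: r).map (fun s => s.getD k 0)) (fun y => y)).getD 0) := by
      simp only [zipStar, List.getElem_map]
      have hk' : k < (zipCols f r).length := by rw [hZlen]; exact hkn
      rw [← List.getD_eq_getElem (zipCols f r) [] hk', hcol]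
    have hval : pyScale110 (P.getD k 0) =
        pyScale110 ((PySem.List.max? ((f :: r).map (fun s => s.getD k 0)) (fun y => y)).getD 0) := by
      congr 1
      rw [hPget k hkn, ← max_all_eq (f :: r).dropLast ref k, hsols]
    rw [← List.getD_eq_getElem _ 0 hkA, hA, hB, hval]
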